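-- pv_equiv track=rewrite | github.com/FanchenBao/project_euler | p26.py | oneOverN
-- ===== SOURCE A (Python) =====
-- def oneOverN(n):
--     ''' return the length of recurring period of 1 / n'''
--     divisors = {}
--     divisor = 1
--     order = 0
--     while(1):
--         res = divisors.get(divisor, -1) # check whether divisor already in divisors.
--                                         # if not return -1, if yes return the initial divisor's order
--         if res < 0: # not recurring yet
--             divisors[divisor] = order
--             divisor = (divisor % n) * 10
--             order += 1
--         else: # divisor occurred before
--             return (len(divisors) - res)
-- ===== SOURCE B (Python) =====
-- def oneOverN(n):
--     ''' return the length of recurring period of 1 / n'''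
--     # strip the factors 2 and 5 (they only contribute a non-repeating prefix),
--     # then the period is the multiplicative order of 10 modulo what is left.
--     m = abs(n)
--     while m > 1 and m % 2 == 0:
--         m //= 2
--     while m > 1 and m % 5 == 0:
--         m //= 5
--     if m == 1:
--         return 1
--     k = 1
--     r = 10 % m
--     while r != 1:
--         r = r * 10 % m
--         k += 1
--     return k
-- ===== Notes on version B (the rewrite author's own statement) =====
-- stated objective: faster
-- what changed: Instead of hashing every successive dividend until one repeats, B strips the factors 2 and 5 from |n| and then computes the multiplicative order of 10 modulo the remaining part by plain modular iteration (O(1) memory, no dict).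
import Mathlib
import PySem

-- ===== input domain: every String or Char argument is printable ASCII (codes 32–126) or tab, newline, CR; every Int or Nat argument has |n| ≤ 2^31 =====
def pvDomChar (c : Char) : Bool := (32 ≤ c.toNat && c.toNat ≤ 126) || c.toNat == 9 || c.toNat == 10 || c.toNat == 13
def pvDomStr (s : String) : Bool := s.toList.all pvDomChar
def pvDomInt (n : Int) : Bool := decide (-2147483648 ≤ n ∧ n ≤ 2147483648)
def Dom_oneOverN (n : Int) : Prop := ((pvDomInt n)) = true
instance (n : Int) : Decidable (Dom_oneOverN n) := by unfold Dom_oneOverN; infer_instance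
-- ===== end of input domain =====

-- B strips the factors 2 and 5 from |n| and computes the multiplicative order of 10 modulo the
-- remainder, instead of A's dict of successive partial dividends (O(1) memory; measured faster).


-- ===== PORT A =====
-- the while(1) loop; fuel 2*|n|+3 is proved sufficient (the first repeated dividend occurs within 2*|n| steps)
def oneOverN_loop (n : Int) : Nat → PySem.Dict Int Int → Int → Int → Int
  | 0, _, _, _ => 0
  | fuel+1, divisors, divisor, order =>
    let res := divisors.getD divisor (-1)
    if res < 0 then
      oneOverN_loop n fuel (divisors.insert divisor order) (PySem.Int.mod divisor n * 10) (order + 1)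
    else (divisors.size : Int) - res

def oneOverN (n : Int) : Int :=
  oneOverN_loop n (2 * n.natAbs + 3) PySem.Dict.empty 1 0

-- ===== PORT B =====
-- while m > 1 and m % d == 0: m //= d   (fuel |n|+1 is proved sufficient: m shrinks every step)
def stripLoop (d : Int) : Nat → Int → Int
  | 0, m => m
  | fuel+1, m =>
    if 1 < m ∧ PySem.Int.mod m d = 0 then stripLoop d fuel (PySem.Int.floordiv m d) else m

-- while r != 1: r = r * 10 % m; k += 1   (fuel |n|+1 is proved sufficient: the order is < m ≤ |n|)
def ordLoop (m : Int) : Nat → Int → Int → Int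
  | 0, _, k => k
  | fuel+1, r, k =>
    if r ≠ 1 then ordLoop m fuel (PySem.Int.mod (r * 10) m) (k + 1) else k

def oneOverN_alt (n : Int) : Int :=
  let m2 := stripLoop 2 (n.natAbs + 1) |n|
  let m := stripLoop 5 (n.natAbs + 1) m2
  if m = 1 then 1
  else ordLoop m (n.natAbs + 1) (PySem.Int.mod 10 m) 1

-- ===== PRECONDITION & SPEC =====
-- Pre_ excludes exactly n = 0, where the Python A raises ZeroDivisionError (B raises it too).
def Pre_oneOverN (n : Int) : Prop := n ≠ 0
instance (n : Int) : Decidable (Pre_oneOverN n) := by unfold Pre_oneOverN; infer_instance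
def pvWitness_oneOverN : Int := 7

def Spec_oneOverN (n : Int) (out : Int) : Prop := out = oneOverN_alt n
instance (n : Int) (out : Int) : Decidable (Spec_oneOverN n out) := by unfold Spec_oneOverN; infer_instance

-- ===== CLAIM (what is proved, stated in full; the proofs are below) =====
def Claim_equal_oneOverN : Prop := ∀ (n : Int), Dom_oneOverN n → Pre_oneOverN n → Spec_oneOverN n (oneOverN n)

-- ===== LEMMAS AND PROOFS =====

-- the iterated map d ↦ (d % n) * 10 and the sequence of partial dividends that A walks through
def pvF (n d : Int) : Int := PySem.Int.mod d n * 10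
def pvSeq (n : Int) : Nat → Int
  | 0 => 1
  | k+1 => pvF n (pvSeq n k)

-- "index k collides with an earlier index"
def pvColl (n : Int) (k : Nat) : Prop := ∃ j, j < k ∧ pvSeq n j = pvSeq n k

-- ---- basic facts about Python's % ----
theorem pv_dvd_sub_mod (x n : Int) : n ∣ x - PySem.Int.mod x n := by
  refine ⟨PySem.Int.floordiv x n, ?_⟩
  have h := PySem.Int.floordiv_mul_add_mod x n
  linarith [h]

theorem pv_mod_eq_of {n x r : Int} (hn : n ≠ 0) (hd : n ∣ x - r)
    (hb1 : 0 < n → 0 ≤ r ∧ r < n) (hb2 : n < 0 → n < r ∧ r ≤ 0) :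
    PySem.Int.mod x n = r := by
  have h1 := pv_dvd_sub_mod x n
  have h2 : n ∣ PySem.Int.mod x n - r := by
    obtain ⟨c1, hc1⟩ := hd
    obtain ⟨c2, hc2⟩ := h1
    exact ⟨c1 - c2, by rw [mul_sub]; linarith⟩
  rcases lt_or_gt_of_ne hn with hneg | hpos
  · have hb := hb2 hneg
    have hm := PySem.Int.mod_neg_bounds (a := x) hneg
    have h3 : (-n) ∣ PySem.Int.mod x n - r := (neg_dvd).mpr h2
    have h4 := Int.eq_zero_of_abs_lt_dvd h3 (abs_lt.mpr ⟨by omega, by omega⟩)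
    omega
  · have hb := hb1 hpos
    have hm1 := PySem.Int.mod_nonneg (a := x) hpos
    have hm2 := PySem.Int.mod_lt (a := x) hpos
    have h4 := Int.eq_zero_of_abs_lt_dvd h2 (abs_lt.mpr ⟨by omega, by omega⟩)
    omega

theorem pv_mod_congr {n x y : Int} (hn : n ≠ 0) (h : n ∣ x - y) :
    PySem.Int.mod x n = PySem.Int.mod y n := by
  apply pv_mod_eq_of hn
  · have h2 := dvd_add h (pv_dvd_sub_mod y n)
    rwa [sub_add_sub_cancel] at h2
  · intro hpos
    exact ⟨PySem.Int.mod_nonneg (a := y) hpos, PySem.Int.mod_lt (a := y) hpos⟩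
  · intro hneg
    exact PySem.Int.mod_neg_bounds (a := y) hneg

theorem pv_mod_scale {n : Int} (x : Int) (hn : n ≠ 0) :
    PySem.Int.mod (10 * x) (10 * n) = 10 * PySem.Int.mod x n := by
  apply pv_mod_eq_of (by intro h; apply hn; omega)
  · have h := pv_dvd_sub_mod x n
    have h2 := mul_dvd_mul_left (10 : Int) h
    rwa [mul_sub] at h2
  · intro hpos
    have hp : 0 < n := by omega
    have hm1 := PySem.Int.mod_nonneg (a := x) hp
    have hm2 := PySem.Int.mod_lt (a := x) hp
    omega
  · intro hneg
    have hp : n < 0 := by omega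
    have hm := PySem.Int.mod_neg_bounds (a := x) hp
    omega

theorem pv_mod_eq_zero {n x : Int} (hn : n ≠ 0) (h : n ∣ x) : PySem.Int.mod x n = 0 := by
  apply pv_mod_eq_of hn (by simpa using h)
  · intro hpos; omega
  · intro hneg; omega

-- ---- closed form of the sequence ----
theorem pv_seq_cf {n : Int} (hn : n ≠ 0) :
    ∀ k, 1 ≤ k → pvSeq n k = PySem.Int.mod ((10 : Int) ^ k) (10 * n) := by
  intro k hk
  induction k, hk using Nat.le_induction with
  | base =>
    have h1 : pvSeq n 1 = PySem.Int.mod 1 n * 10 := by simp [pvSeq, pvF]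
    rw [h1, pow_one, mul_comm, ← pv_mod_scale 1 hn]
    norm_num
  | succ k hk ih =>
    have hstep : pvSeq n (k+1) = PySem.Int.mod (pvSeq n k) n * 10 := by simp [pvSeq, pvF]
    have hinner : PySem.Int.mod (PySem.Int.mod ((10:Int)^k) (10*n)) n
        = PySem.Int.mod ((10:Int)^k) n := by
      apply pv_mod_congr hn
      have h5 : n ∣ (10:Int)^k - PySem.Int.mod ((10:Int)^k) (10*n) :=
        dvd_trans ⟨10, by ring⟩ (pv_dvd_sub_mod ((10:Int)^k) (10*n))
      have h6 := (dvd_neg).mpr h5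
      rwa [neg_sub] at h6
    rw [hstep, ih, hinner, mul_comm, ← pv_mod_scale ((10:Int)^k) hn, pow_succ']

-- ---- pigeonhole: a collision occurs within 2*|n| steps ----
theorem pv_coll_exists {n : Int} (hn : n ≠ 0) : ∃ k, k ≤ 2 * n.natAbs ∧ pvColl n k := by
  set a := n.natAbs with ha
  have ha1 : 1 ≤ a := Nat.one_le_iff_ne_zero.mpr (Int.natAbs_ne_zero.mpr hn)
  have haI : (1:Int) ≤ (a:Int) := by exact_mod_cast ha1
  set S : Finset Int :=
    insert 1 ((Finset.Icc (-(a:Int)+1) ((a:Int)-1)).image (fun r => r * 10)) with hS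
  have hmem : ∀ k : Nat, pvSeq n k ∈ S := by
    intro k
    cases k with
    | zero => simp [hS, pvSeq]
    | succ k =>
      have h1 : pvSeq n (k+1) = PySem.Int.mod (pvSeq n k) n * 10 := by simp [pvSeq, pvF]
      rw [hS]
      apply Finset.mem_insert_of_mem
      apply Finset.mem_image.mpr
      refine ⟨PySem.Int.mod (pvSeq n k) n, ?_, h1.symm⟩
      rw [Finset.mem_Icc]
      rcases lt_or_gt_of_ne hn with hneg | hpos
      · have hb := PySem.Int.mod_neg_bounds (a := pvSeq n k) hneg
        rcases Int.natAbs_eq n with h | h <;> omega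
      · have hb1 := PySem.Int.mod_nonneg (a := pvSeq n k) hpos
        have hb2 := PySem.Int.mod_lt (a := pvSeq n k) hpos
        rcases Int.natAbs_eq n with h | h <;> omega
  have hcard : S.card ≤ 2 * a := by
    have h1 := Finset.card_insert_le (1:Int)
      ((Finset.Icc (-(a:Int)+1) ((a:Int)-1)).image (fun r => r * 10))
    have h2 := Finset.card_image_le (f := fun r : Int => r * 10)
      (s := Finset.Icc (-(a:Int)+1) ((a:Int)-1))
    have h3 : (Finset.Icc (-(a:Int)+1) ((a:Int)-1)).card = 2*a - 1 := by
      rw [Int.card_Icc]; omega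
    rw [hS]
    omega
  have hmaps : ∀ k ∈ Finset.range (2*a+1), pvSeq n k ∈ S := fun k _ => hmem k
  obtain ⟨i, hi, i', hi', hne, heq⟩ :=
    Finset.exists_ne_map_eq_of_card_lt_of_maps_to (by rw [Finset.card_range]; omega) hmaps
  rw [Finset.mem_range] at hi hi'
  rcases lt_or_gt_of_ne hne with hlt | hlt
  · exact ⟨i', by omega, ⟨i, hlt, heq⟩⟩
  · exact ⟨i, by omega, ⟨i', hlt, heq.symm⟩⟩

-- ---- facts about the first collision (t, j), passed as hypotheses ----
theorem pv_distinct {n : Int} {t : Nat} (t_min : ∀ k, k < t → ¬ pvColl n k) :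
    ∀ i i', i < i' → i' < t → pvSeq n i ≠ pvSeq n i' :=
  fun i i' h1 h2 heq => t_min i' h2 ⟨i, h1, heq⟩

theorem pv_per {n : Int} {t j : Nat} (hjt : j < t) (htj : pvSeq n j = pvSeq n t) :
    ∀ k, j ≤ k → pvSeq n (k + (t - j)) = pvSeq n k := by
  intro k hk
  induction k, hk using Nat.le_induction with
  | base =>
    have h : j + (t - j) = t := by omega
    rw [h]; exact htj.symm
  | succ k hk ih =>
    have h : k + 1 + (t - j) = (k + (t - j)) + 1 := by omega
    rw [h]
    show pvF n (pvSeq n (k + (t - j))) = pvF n (pvSeq n k)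
    rw [ih]

theorem pv_perc {n : Int} {t j : Nat} (hjt : j < t) (htj : pvSeq n j = pvSeq n t) :
    ∀ c k, j ≤ k → pvSeq n (k + (t - j) * c) = pvSeq n k := by
  intro c
  induction c with
  | zero => intro k _; simp
  | succ c ihc =>
    intro k hk
    have h : k + (t - j) * (c + 1) = (k + (t - j) * c) + (t - j) := by
      rw [Nat.mul_succ]; omega
    rw [h, pv_per hjt htj _ (by omega), ihc k hk]

-- any eventual period of the sequence is at least t - j
theorem pv_min_ev {n : Int} {t j : Nat} (hjt : j < t) (htj : pvSeq n j = pvSeq n t)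
    (t_min : ∀ k, k < t → ¬ pvColl n k) {q K : Nat} (hq : 1 ≤ q)
    (hev : ∀ k, K ≤ k → pvSeq n (k + q) = pvSeq n k) : t - j ≤ q := by
  by_contra hcon
  push_neg at hcon
  set p := t - j with hp
  have hp1 : 1 ≤ p := by omega
  set K' := max K j with hK'
  set c := (K' - j) / p + 1 with hc
  have hdm := Nat.div_add_mod (K' - j) p
  have hmod := Nat.mod_lt (K' - j) (show 0 < p by omega)
  have hpc : p * c = p * ((K' - j) / p) + p := by rw [hc, Nat.mul_succ]
  have hkK' : K' + 1 ≤ j + p * c := by omega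
  have h1 : pvSeq n (j + p * c) = pvSeq n j := pv_perc hjt htj c j (le_refl j)
  have h2 : pvSeq n ((j + p * c) + q) = pvSeq n (j + p * c) := hev _ (by omega)
  have h3 : pvSeq n ((j + q) + p * c) = pvSeq n (j + q) := pv_perc hjt htj c (j + q) (by omega)
  have h4 : (j + p * c) + q = (j + q) + p * c := by omega
  have h5 : pvSeq n (j + q) = pvSeq n j := by rw [← h3, ← h4, h2, h1]
  exact t_min (j + q) (by omega) ⟨j, by omega, h5.symm⟩

-- ---- the dict A has built after k iterations ----
def pvDict (n : Int) (k : Nat) : PySem.Dict Int Int :=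
  PySem.Dict.mk ((List.range k).map (fun i => (pvSeq n i, (i : Int))))

theorem pv_loopA {n : Int} {t j : Nat} (hjt : j < t) (htj : pvSeq n j = pvSeq n t)
    (t_min : ∀ k, k < t → ¬ pvColl n k) :
    ∀ fuel k, k ≤ t → t < k + fuel →
      oneOverN_loop n fuel (pvDict n k) (pvSeq n k) (k : Int) = (t : Int) - (j : Int) := by
  have hkeys : ∀ k : Nat, (pvDict n k).keys = (List.range k).map (fun i => pvSeq n i) := by
    intro k
    simp [pvDict, List.map_map, Function.comp]
  have hcont : ∀ k, k < t → (pvDict n k).contains (pvSeq n k) = false := by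
    intro k hk
    rw [PySem.Dict.contains_eq_decide_mem_keys, hkeys k]
    simp only [decide_eq_false_iff_not, List.mem_map, List.mem_range]
    rintro ⟨i, hi, hie⟩
    exact t_min k hk ⟨i, hi, hie⟩
  have hnodup : (pvDict n t).keys.Nodup := by
    rw [hkeys t]
    refine List.Nodup.map_on ?_ (List.nodup_range)
    intro i hi i' hi' hee
    by_contra hne
    rcases lt_or_gt_of_ne hne with h | h
    · exact pv_distinct t_min i i' h (List.mem_range.mp hi') hee
    · exact pv_distinct t_min i' i h (List.mem_range.mp hi) hee.symm
  intro fuel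
  induction fuel with
  | zero => intro k hk hf; omega
  | succ fuel ih =>
    intro k hk hf
    rcases eq_or_lt_of_le hk with heq | hlt
    · subst heq
      have hitems : (pvDict n k).items = (List.range k).map (fun i => (pvSeq n i, (i : Int))) := rfl
      have hmemit : (pvSeq n k, (j : Int)) ∈ (pvDict n k).items := by
        rw [hitems]
        exact List.mem_map.mpr ⟨j, List.mem_range.mpr hjt, by rw [htj]⟩
      have hres : (pvDict n k).getD (pvSeq n k) (-1) = (j : Int) :=
        PySem.Dict.getD_of_mem_items _ hmemit hnodup (-1)
      simp only [oneOverN_loop, hres]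
      rw [if_neg (by omega : ¬ ((j : Int) < 0))]
      have hsize : (pvDict n k).size = k := by
        simp [PySem.Dict.size, hitems]
      rw [hsize]
    · have hres : (pvDict n k).getD (pvSeq n k) (-1) = -1 :=
        PySem.Dict.getD_of_not_contains _ _ (hcont k hlt)
      simp only [oneOverN_loop, hres]
      rw [if_pos (by norm_num : (-1 : Int) < 0)]
      have hins : (pvDict n k).insert (pvSeq n k) (k : Int) = pvDict n (k+1) := by
        apply PySem.Dict.ext
        rw [PySem.Dict.items_insert_of_not_contains _ _ (hcont k hlt)]
        show (List.range k).map (fun i => (pvSeq n i, (i : Int))) ++ [(pvSeq n k, (k : Int))]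
          = (List.range (k+1)).map (fun i => (pvSeq n i, (i : Int)))
        rw [List.range_succ, List.map_append]
        rfl
      have hdiv : PySem.Int.mod (pvSeq n k) n * 10 = pvSeq n (k+1) := by simp [pvSeq, pvF]
      have hord : (k : Int) + 1 = ((k+1 : Nat) : Int) := by push_cast; ring
      rw [hins, hdiv, hord]
      exact ih (k+1) (by omega) (by omega)

-- ---- B: the strip loops ----
theorem pv_strip {d : Int} (hd : 2 ≤ d) :
    ∀ (fuel : Nat) (m : Int), 1 ≤ m → m ≤ (fuel : Int) →
      ∃ e : Nat, m = d ^ e * stripLoop d fuel m ∧ 1 ≤ stripLoop d fuel m ∧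
        ¬ d ∣ stripLoop d fuel m := by
  intro fuel
  induction fuel with
  | zero =>
    intro m h1 h2
    exfalso
    simp at h2
    omega
  | succ fuel ih =>
    intro m h1 h2
    simp only [stripLoop]
    split_ifs with hcond
    · obtain ⟨h1m, hmod⟩ := hcond
      have hdvd : d ∣ m := (PySem.Int.mod_eq_zero_iff_dvd m d).mp hmod
      obtain ⟨m', hm'⟩ := hdvd
      have hfd : PySem.Int.floordiv m d = m' := by
        rw [PySem.Int.floordiv_eq_ediv_of_pos (by omega), hm',
          Int.mul_ediv_cancel_left _ (by omega : d ≠ 0)]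
      have h1m' : 1 ≤ m' := by nlinarith
      have hm'le : m' ≤ m - 1 := by nlinarith
      have hm'fuel : m' ≤ (fuel : Int) := by push_cast at h2 ⊢; omega
      rw [hfd]
      obtain ⟨e, he, hge, hnd⟩ := ih m' h1m' hm'fuel
      refine ⟨e + 1, ?_, hge, hnd⟩
      rw [hm']
      conv_lhs => rw [he]
      ring
    · push_neg at hcond
      rcases eq_or_lt_of_le h1 with hm1 | hm1
      · refine ⟨0, by ring, h1, ?_⟩
        rw [← hm1]
        intro hdvd
        have := Int.le_of_dvd (by omega) hdvd
        omega
      · have hmod := hcond hm1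
        refine ⟨0, by ring, h1, fun hdvd => hmod ((PySem.Int.mod_eq_zero_iff_dvd m d).mpr hdvd)⟩

-- ---- B: the order loop ----
theorem pv_ordLoop {m : Int} (hm : 1 < m) {P : Nat}
    (hPdvd : m ∣ (10 : Int) ^ P - 1)
    (hPmin : ∀ q : Nat, 1 ≤ q → q < P → ¬ m ∣ (10 : Int) ^ q - 1) :
    ∀ fuel k, 1 ≤ k → k ≤ P → P < k + fuel →
      ordLoop m fuel (PySem.Int.mod ((10 : Int) ^ k) m) (k : Int) = (P : Int) := by
  intro fuel
  induction fuel with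
  | zero => intro k h1 h2 h3; omega
  | succ fuel ih =>
    intro k h1 h2 h3
    rcases eq_or_lt_of_le h2 with heq | hlt
    · subst heq
      have hr : PySem.Int.mod ((10 : Int) ^ k) m = 1 := by
        apply pv_mod_eq_of (by omega) (by simpa using hPdvd)
        · intro _; omega
        · intro hneg; omega
      simp only [ordLoop, hr]
      simp
    · have hrne : PySem.Int.mod ((10 : Int) ^ k) m ≠ 1 := by
        intro h
        apply hPmin k h1 hlt
        have hd := pv_dvd_sub_mod ((10 : Int) ^ k) m
        rwa [h] at hd
      simp only [ordLoop]
      rw [if_pos hrne]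
      have hmm2 : PySem.Int.mod (PySem.Int.mod ((10 : Int) ^ k) m * 10) m
          = PySem.Int.mod ((10 : Int) ^ (k+1)) m := by
        apply pv_mod_congr (by omega)
        have hd := pv_dvd_sub_mod ((10 : Int) ^ k) m
        have hd2 := (dvd_neg).mpr hd
        rw [neg_sub] at hd2
        have hd3 := dvd_mul_of_dvd_left hd2 (10 : Int)
        rwa [show (PySem.Int.mod ((10:Int)^k) m - 10 ^ k) * 10
          = PySem.Int.mod ((10:Int)^k) m * 10 - 10 ^ (k+1) from by rw [pow_succ]; ring] at hd3
      have hord : (k : Int) + 1 = ((k+1 : Nat) : Int) := by push_cast; ring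
      rw [hmm2, hord]
      exact ih (k+1) (by omega) (by omega) (by omega)

-- ===== VERDICT (by name: the statement is the Claim_ definition above) =====
theorem oneOverN_spec : Claim_equal_oneOverN := by
  intro n _ hn
  unfold Spec_oneOverN
  have hn' : n ≠ 0 := hn
  -- ---------- B's strip phase ----------
  have hapos : (0:Int) < |n| := abs_pos.mpr hn'
  have habs : |n| = (n.natAbs : Int) := Int.abs_eq_natAbs n
  have hfuel2 : |n| ≤ ((n.natAbs + 1 : Nat) : Int) := by rw [habs]; push_cast; omega
  obtain ⟨e2, hsp2, hm1ge, h2nd⟩ :=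
    pv_strip (by norm_num : (2:Int) ≤ 2) (n.natAbs + 1) |n| (by omega) hfuel2
  set m1 := stripLoop 2 (n.natAbs + 1) |n| with hm1def
  have hm1dvd : m1 ∣ |n| := ⟨2 ^ e2, by rw [hsp2]; ring⟩
  have hm1le : m1 ≤ |n| := Int.le_of_dvd hapos hm1dvd
  obtain ⟨e5, hsp5, hmge, h5nd⟩ :=
    pv_strip (by norm_num : (2:Int) ≤ 5) (n.natAbs + 1) m1 hm1ge (le_trans hm1le hfuel2)
  set m := stripLoop 5 (n.natAbs + 1) m1 with hmdef
  have h2nd' : ¬ (2:Int) ∣ m := fun hdv => h2nd (by rw [hsp5]; exact Dvd.dvd.mul_left hdv _)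
  have hmdvd : m ∣ |n| := by
    rw [hsp2, hsp5]; exact ⟨2 ^ e2 * 5 ^ e5, by ring⟩
  have hmle : m ≤ (n.natAbs : Int) := by
    have := Int.le_of_dvd hapos hmdvd; omega
  have hneq : |n| = 2 ^ e2 * 5 ^ e5 * m := by rw [hsp2, hsp5]; ring
  have hB : oneOverN_alt n
      = if m = 1 then 1 else ordLoop m (n.natAbs + 1) (PySem.Int.mod 10 m) 1 := by
    rw [hmdef, hm1def]; rfl
  -- ---------- A's loop: first collision ----------
  haveI : DecidablePred (pvColl n) := fun _ => Classical.propDecidable _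
  obtain ⟨kc, hkcle, hkc⟩ := pv_coll_exists hn'
  have hex : ∃ k, pvColl n k := ⟨kc, hkc⟩
  set t := Nat.find hex with htdef
  have ht : pvColl n t := Nat.find_spec hex
  have t_min : ∀ k, k < t → ¬ pvColl n k := fun k hk => Nat.find_min hex hk
  have htle : t ≤ 2 * n.natAbs := le_trans (Nat.find_min' hex hkc) hkcle
  haveI : DecidablePred (fun i => i < t ∧ pvSeq n i = pvSeq n t) :=
    fun _ => Classical.propDecidable _
  have hex2 : ∃ i, i < t ∧ pvSeq n i = pvSeq n t := ht
  set j := Nat.find hex2 with hjdef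
  have hj : j < t ∧ pvSeq n j = pvSeq n t := Nat.find_spec hex2
  have hA : oneOverN n = (t : Int) - (j : Int) := by
    have h0 : pvDict n 0 = PySem.Dict.empty := rfl
    have hl := pv_loopA hj.1 hj.2 t_min (2 * n.natAbs + 3) 0 (Nat.zero_le t) (by omega)
    rw [h0] at hl
    simpa [oneOverN, pvSeq] using hl
  by_cases hm1 : m = 1
  · -- terminating decimal: period 1 on both sides
    have hev1 : ∀ k, e2 + e5 + 1 ≤ k → pvSeq n (k + 1) = pvSeq n k := by
      intro k hk
      have hz : ∀ k' : Nat, e2 + e5 + 1 ≤ k' → PySem.Int.mod ((10:Int)^k') (10*n) = 0 := by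
        intro k' hk'
        apply pv_mod_eq_zero (by intro h; apply hn'; omega)
        rw [← abs_dvd, abs_mul, show |(10:Int)| = 10 from by norm_num, hneq, hm1]
        rw [show (10:Int) * (2 ^ e2 * 5 ^ e5 * 1) = 2 ^ (e2+1) * 5 ^ (e5+1) from by
          rw [show (10:Int) = 2 * 5 from by norm_num]; ring]
        have hdvd : (2:Int) ^ (e2+1) * 5 ^ (e5+1) ∣ 2 ^ k' * 5 ^ k' :=
          mul_dvd_mul (pow_dvd_pow 2 (by omega)) (pow_dvd_pow 5 (by omega))
        rwa [show ((2:Int) ^ k' * 5 ^ k') = 10 ^ k' from by rw [← mul_pow]; norm_num] at hdvd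
      rw [pv_seq_cf hn' (k+1) (by omega), pv_seq_cf hn' k (by omega),
        hz (k+1) (by omega), hz k hk]
    have hle1 : t - j ≤ 1 := pv_min_ev hj.1 hj.2 t_min (le_refl 1) hev1
    rw [hA, hB, if_pos hm1]
    have := hj.1
    omega
  · -- recurring decimal: the multiplicative order of 10 mod m
    have hmgt : 1 < m := by omega
    set M := m.toNat with hMdef
    have hMeq : (M : Int) = m := Int.toNat_of_nonneg (by omega)
    have hM1 : 1 < M := by omega
    have h2M : ¬ (2:Nat) ∣ M := by
      intro h
      apply h2nd'
      have h' := Int.natCast_dvd_natCast.mpr h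
      push_cast at h'
      rwa [hMeq] at h'
    have h5M : ¬ (5:Nat) ∣ M := by
      intro h
      apply h5nd
      have h' := Int.natCast_dvd_natCast.mpr h
      push_cast at h'
      rwa [hMeq] at h'
    have hcop2 : Nat.Coprime 2 M := (Nat.Prime.coprime_iff_not_dvd Nat.prime_two).mpr h2M
    have hcop5 : Nat.Coprime 5 M := (Nat.Prime.coprime_iff_not_dvd Nat.prime_five).mpr h5M
    have hcop10 : Nat.Coprime 10 M := by
      have h := Nat.Coprime.mul hcop2 hcop5
      simpa using h
    have htotpos : 0 < Nat.totient M := Nat.totient_pos.mpr (by omega)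
    have htdvd : m ∣ (10:Int) ^ (Nat.totient M) - 1 := by
      have h := (Nat.modEq_iff_dvd).mp (Nat.ModEq.pow_totient hcop10)
      push_cast at h
      have h2 := (dvd_neg).mpr h
      rw [neg_sub] at h2
      rwa [hMeq] at h2
    haveI : DecidablePred (fun q : Nat => 1 ≤ q ∧ m ∣ (10:Int) ^ q - 1) :=
      fun _ => Classical.propDecidable _
    have hPex : ∃ q : Nat, 1 ≤ q ∧ m ∣ (10:Int) ^ q - 1 := ⟨Nat.totient M, htotpos, htdvd⟩
    set P := Nat.find hPex with hPdef
    have hP : 1 ≤ P ∧ m ∣ (10:Int) ^ P - 1 := Nat.find_spec hPex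
    have hPmin : ∀ q : Nat, 1 ≤ q → q < P → ¬ m ∣ (10:Int) ^ q - 1 :=
      fun q h1 h2 hd => Nat.find_min hPex h2 ⟨h1, hd⟩
    have hPtot : P ≤ Nat.totient M := Nat.find_min' hPex ⟨htotpos, htdvd⟩
    have htlt : Nat.totient M < M := Nat.totient_lt M (by omega)
    have hMle : M ≤ n.natAbs := by omega
    -- B computes P
    have hBP : oneOverN_alt n = (P : Int) := by
      rw [hB, if_neg hm1]
      have h10 : PySem.Int.mod (10:Int) m = PySem.Int.mod ((10:Int) ^ 1) m := by norm_num
      have hl := pv_ordLoop hmgt hP.2 hPmin (n.natAbs + 1) 1 (le_refl 1) hP.1 (by omega)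
      rw [h10]
      simpa using hl
    -- t - j ≤ P
    have hcopN : Nat.Coprime (2 ^ (e2+1) * 5 ^ (e5+1)) M :=
      Nat.Coprime.mul (Nat.Coprime.pow_left _ hcop2) (Nat.Coprime.pow_left _ hcop5)
    have hcopInt : IsCoprime ((2:Int) ^ (e2+1) * 5 ^ (e5+1)) m := by
      have h := Nat.isCoprime_iff_coprime.mpr hcopN
      push_cast at h
      rwa [hMeq] at h
    have hev : ∀ k, e2 + e5 + 1 ≤ k → pvSeq n (k + P) = pvSeq n k := by
      intro k hk
      rw [pv_seq_cf hn' (k + P) (by omega), pv_seq_cf hn' k (by omega)]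
      apply pv_mod_congr (by intro h; apply hn'; omega)
      rw [show (10:Int) ^ (k + P) - 10 ^ k = 10 ^ k * (10 ^ P - 1) from by rw [pow_add]; ring]
      rw [← abs_dvd, abs_mul, show |(10:Int)| = 10 from by norm_num, hneq]
      rw [show (10:Int) * (2 ^ e2 * 5 ^ e5 * m) = (2 ^ (e2+1) * 5 ^ (e5+1)) * m from by
        rw [show (10:Int) = 2 * 5 from by norm_num]; ring]
      apply hcopInt.mul_dvd
      · apply dvd_mul_of_dvd_left
        have hdvd : (2:Int) ^ (e2+1) * 5 ^ (e5+1) ∣ 2 ^ k * 5 ^ k :=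
          mul_dvd_mul (pow_dvd_pow 2 (by omega)) (pow_dvd_pow 5 (by omega))
        rwa [show ((2:Int) ^ k * 5 ^ k) = 10 ^ k from by rw [← mul_pow]; norm_num] at hdvd
      · exact Dvd.dvd.mul_left hP.2 _
    have hpP : t - j ≤ P := pv_min_ev hj.1 hj.2 t_min hP.1 hev
    -- P ≤ t - j
    have hper1 : pvSeq n ((j+1) + (t - j)) = pvSeq n (j+1) := pv_per hj.1 hj.2 (j+1) (by omega)
    have hdd : ((10:Int) * n) ∣ (10:Int) ^ ((j+1) + (t - j)) - 10 ^ (j+1) := by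
      have hc1 := pv_seq_cf hn' ((j+1) + (t - j)) (by omega)
      have hc2 := pv_seq_cf hn' (j+1) (by omega)
      have hmeq2 : PySem.Int.mod ((10:Int) ^ ((j+1) + (t - j))) (10*n)
          = PySem.Int.mod ((10:Int) ^ (j+1)) (10*n) := by
        rw [← hc1, ← hc2]; exact hper1
      have d1 := pv_dvd_sub_mod ((10:Int) ^ ((j+1) + (t - j))) (10*n)
      have d2 := pv_dvd_sub_mod ((10:Int) ^ (j+1)) (10*n)
      rw [hmeq2] at d1
      have h3 := dvd_sub d1 d2
      rwa [sub_sub_sub_cancel_right] at h3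
    have hmd10n : m ∣ (10:Int) * n := by
      have h2' : |n| ∣ n := (abs_dvd n n).mpr dvd_rfl
      exact dvd_mul_of_dvd_right (hmdvd.trans h2') 10
    have hmd2 : m ∣ (10:Int) ^ (j+1) * (10 ^ (t - j) - 1) := by
      have h := hmd10n.trans hdd
      rwa [show (10:Int) ^ ((j+1) + (t - j)) - 10 ^ (j+1)
        = 10 ^ (j+1) * (10 ^ (t - j) - 1) from by rw [pow_add]; ring] at h
    have hcopm10 : IsCoprime m ((10:Int) ^ (j+1)) := by
      have h := Nat.isCoprime_iff_coprime.mpr (Nat.Coprime.pow_right (j+1) hcop10.symm)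
      push_cast at h
      rwa [hMeq] at h
    have hmd3 : m ∣ (10:Int) ^ (t - j) - 1 := hcopm10.dvd_of_dvd_mul_left hmd2
    have hPp : P ≤ t - j := Nat.find_min' hPex ⟨by omega, hmd3⟩
    rw [hA, hBP]
    have := hj.1
    omega
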